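-- pv_equiv track=rewrite | github.com/ykylcxlx/sysu-ai2024 | lab3-归结推理/归结推理.py | indexfind
-- ===== SOURCE A (Python) =====
-- def indexfind(clause1,clause2):
--     for i,literal1 in enumerate(clause1):
--         if not literal1.startswith("~"):
--             for j,literal2 in enumerate(clause2):
--                 if literal2.startswith("~"):
--                     qianzhui1 = literal1.split("(")[0]
--                     qianzhui2 = literal2.split("(")[0].lstrip('~')
--                     if(qianzhui1 == qianzhui2):
--                         return [i,j]
--     for i,literal1 in enumerate(clause1):
--         if literal1.startswith("~"):
--             for j,literal2 in enumerate(clause2):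
--                 if not literal2.startswith("~"):
--                     qianzhui1 = literal1.split("(")[0].lstrip('~')
--                     qianzhui2 = literal2.split("(")[0]
--                     if(qianzhui1 == qianzhui2):
--                         return [i,j]
--     return [-1,-1]
-- ===== SOURCE B (Python) =====
-- def indexfind(clause1, clause2):
--     # One pass over clause2 builds two predicate->first-index maps, then a single
--     # scan over clause1 per phase replaces A's nested loops: O(n+m) vs O(n*m).
--     neg = {}
--     pos = {}
--     for j, lit in enumerate(clause2):
--         pred = lit.split("(")[0]
--         if lit.startswith("~"):
--             neg.setdefault(pred.lstrip("~"), j)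
--         else:
--             pos.setdefault(pred, j)
--     for i, lit in enumerate(clause1):
--         if not lit.startswith("~"):
--             j = neg.get(lit.split("(")[0])
--             if j is not None:
--                 return [i, j]
--     for i, lit in enumerate(clause1):
--         if lit.startswith("~"):
--             j = pos.get(lit.split("(")[0].lstrip("~"))
--             if j is not None:
--                 return [i, j]
--     return [-1, -1]
-- ===== Notes on version B (the rewrite author's own statement) =====
-- stated objective: faster
-- what changed: Replaces A's nested scans of clause2 (restarted for every literal of clause1 in each of the two phases) with two predicate-name->first-index dicts built in one pass over clause2, so each phase is a single pass over clause1 with O(1) lookups.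
import Mathlib
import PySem

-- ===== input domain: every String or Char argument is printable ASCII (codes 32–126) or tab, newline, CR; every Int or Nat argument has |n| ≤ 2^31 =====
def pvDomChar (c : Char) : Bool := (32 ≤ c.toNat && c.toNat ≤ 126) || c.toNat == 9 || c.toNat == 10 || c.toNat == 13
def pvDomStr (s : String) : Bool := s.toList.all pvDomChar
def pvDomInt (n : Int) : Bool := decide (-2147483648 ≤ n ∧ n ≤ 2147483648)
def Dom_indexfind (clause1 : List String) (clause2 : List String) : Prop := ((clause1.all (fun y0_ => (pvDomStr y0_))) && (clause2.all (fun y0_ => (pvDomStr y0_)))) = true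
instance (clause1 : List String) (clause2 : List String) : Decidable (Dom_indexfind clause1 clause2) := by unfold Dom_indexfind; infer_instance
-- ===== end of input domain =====

-- B replaces A's nested clause2 scans with two predicate->first-index dicts built once (faster, asymptotic).


-- shared string helpers (the same Python expressions occur in A and B)
-- s.split("(")[0]: split? with a nonempty separator always returns a nonempty list, so [0] never raises
def splitHead (s : String) : String :=
  match PySem.Str.split? s "(" with
  | some (p :: _) => p
  | _ => ""

-- s.lstrip('~'): exact hand port — removes every leading '~'
def lstripT (s : String) : String := String.mk (s.toList.dropWhile (· == '~'))

-- ===== PORT A =====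
-- inner loop of phase 1: for j, literal2 in enumerate(clause2) …
def afind1 (literal1 : String) : List String → Int → Option Int
  | [], _ => none
  | literal2 :: rest, j =>
    if PySem.Str.startswith literal2 "~" then
      let qianzhui1 := splitHead literal1
      let qianzhui2 := lstripT (splitHead literal2)
      if qianzhui1 == qianzhui2 then some j else afind1 literal1 rest (j + 1)
    else afind1 literal1 rest (j + 1)

-- inner loop of phase 2
def afind2 (literal1 : String) : List String → Int → Option Int
  | [], _ => none
  | literal2 :: rest, j =>
    if !PySem.Str.startswith literal2 "~" then
      let qianzhui1 := lstripT (splitHead literal1)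
      let qianzhui2 := splitHead literal2
      if qianzhui1 == qianzhui2 then some j else afind2 literal1 rest (j + 1)
    else afind2 literal1 rest (j + 1)

-- first for-loop over enumerate(clause1)
def aloop1 : List String → List String → Int → Option (List Int)
  | [], _, _ => none
  | literal1 :: rest, clause2, i =>
    if !PySem.Str.startswith literal1 "~" then
      match afind1 literal1 clause2 0 with
      | some j => some [i, j]
      | none => aloop1 rest clause2 (i + 1)
    else aloop1 rest clause2 (i + 1)

-- second for-loop over enumerate(clause1)
def aloop2 : List String → List String → Int → Option (List Int)
  | [], _, _ => none
  | literal1 :: rest, clause2, i =>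
    if PySem.Str.startswith literal1 "~" then
      match afind2 literal1 clause2 0 with
      | some j => some [i, j]
      | none => aloop2 rest clause2 (i + 1)
    else aloop2 rest clause2 (i + 1)

def indexfind (clause1 : List String) (clause2 : List String) : List Int :=
  match aloop1 clause1 clause2 0 with
  | some r => r
  | none =>
    match aloop2 clause1 clause2 0 with
    | some r => r
    | none => [-1, -1]

-- ===== PORT B =====
-- for j, lit in enumerate(clause2): fill the two setdefault dicts
def bbuild : List String → Int → PySem.Dict String Int → PySem.Dict String Int →
    PySem.Dict String Int × PySem.Dict String Int
  | [], _, neg, pos => (neg, pos)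
  | lit :: rest, j, neg, pos =>
    let pred := splitHead lit
    if PySem.Str.startswith lit "~" then
      bbuild rest (j + 1) (neg.setdefault (lstripT pred) j) pos
    else
      bbuild rest (j + 1) neg (pos.setdefault pred j)

-- first pass over clause1: positive literal, lookup in neg
def bloop1 (neg : PySem.Dict String Int) : List String → Int → Option (List Int)
  | [], _ => none
  | lit :: rest, i =>
    if !PySem.Str.startswith lit "~" then
      match neg.get? (splitHead lit) with
      | some j => some [i, j]
      | none => bloop1 neg rest (i + 1)
    else bloop1 neg rest (i + 1)

-- second pass over clause1: negated literal, lookup in pos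
def bloop2 (pos : PySem.Dict String Int) : List String → Int → Option (List Int)
  | [], _ => none
  | lit :: rest, i =>
    if PySem.Str.startswith lit "~" then
      match pos.get? (lstripT (splitHead lit)) with
      | some j => some [i, j]
      | none => bloop2 pos rest (i + 1)
    else bloop2 pos rest (i + 1)

def indexfind_alt (clause1 : List String) (clause2 : List String) : List Int :=
  let dicts := bbuild clause2 0 PySem.Dict.empty PySem.Dict.empty
  match bloop1 dicts.1 clause1 0 with
  | some r => r
  | none =>
    match bloop2 dicts.2 clause1 0 with
    | some r => r
    | none => [-1, -1]

-- ===== PRECONDITION & SPEC =====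
def Spec_indexfind (clause1 : List String) (clause2 : List String) (out : List Int) : Prop := out = indexfind_alt clause1 clause2
instance (clause1 : List String) (clause2 : List String) (out : List Int) : Decidable (Spec_indexfind clause1 clause2 out) := by unfold Spec_indexfind; infer_instance

-- ===== CLAIM (what is proved, stated in full; the proofs are below) =====
def Claim_equal_indexfind : Prop := ∀ (clause1 : List String) (clause2 : List String), Dom_indexfind clause1 clause2 → Spec_indexfind clause1 clause2 (indexfind clause1 clause2)

-- ===== LEMMAS AND PROOFS =====

-- first j in c2 (counting from j0) whose literal is negated and whose stripped predicate is p
def searchNeg (p : String) : List String → Int → Option Int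
  | [], _ => none
  | lit :: rest, j =>
    if PySem.Str.startswith lit "~" && (p == lstripT (splitHead lit)) then some j
    else searchNeg p rest (j + 1)

-- first j in c2 whose literal is positive and whose predicate is p
def searchPos (p : String) : List String → Int → Option Int
  | [], _ => none
  | lit :: rest, j =>
    if !PySem.Str.startswith lit "~" && (p == splitHead lit) then some j
    else searchPos p rest (j + 1)

theorem afind1_eq (lit : String) (c2 : List String) (j : Int) :
    afind1 lit c2 j = searchNeg (splitHead lit) c2 j := by
  induction c2 generalizing j with
  | nil => rfl
  | cons l rest ih =>
    simp only [afind1, searchNeg, Bool.and_eq_true]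
    by_cases h1 : PySem.Str.startswith l "~" = true <;>
      by_cases h2 : (splitHead lit == lstripT (splitHead l)) = true <;>
      simp [h1, h2, ih]

theorem afind2_eq (lit : String) (c2 : List String) (j : Int) :
    afind2 lit c2 j = searchPos (lstripT (splitHead lit)) c2 j := by
  induction c2 generalizing j with
  | nil => rfl
  | cons l rest ih =>
    simp only [afind2, searchPos, Bool.and_eq_true]
    by_cases h1 : PySem.Str.startswith l "~" = true <;>
      by_cases h2 : (lstripT (splitHead lit) == splitHead l) = true <;>
      simp [h1, h2, ih]

theorem bbuild_neg_get? (c2 : List String) (j : Int)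
    (neg pos : PySem.Dict String Int) (p : String) :
    (bbuild c2 j neg pos).1.get? p =
      if neg.contains p then neg.get? p else searchNeg p c2 j := by
  induction c2 generalizing j neg pos with
  | nil =>
    rw [PySem.Dict.contains_eq_isSome_get?]
    cases hn : neg.get? p <;> simp [bbuild, searchNeg, hn]
  | cons l rest ih =>
    simp only [bbuild, searchNeg]
    by_cases h1 : PySem.Str.startswith l "~" = true
    · rw [if_pos h1, ih]
      by_cases h2 : p = lstripT (splitHead l)
      · rw [h2, PySem.Dict.contains_setdefault, PySem.Dict.get?_setdefault_self]
        simp only [BEq.rfl, Bool.true_or, if_true, h1, Bool.true_and]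
        rw [PySem.Dict.contains_eq_isSome_get?]
        cases hn : neg.get? (lstripT (splitHead l)) <;> simp [hn]
      · have hb : (p == lstripT (splitHead l)) = false := by
          simpa using h2
        rw [PySem.Dict.contains_setdefault,
            PySem.Dict.get?_setdefault_of_ne _ _ h2, hb]
        simp only [Bool.or_false, Bool.and_false, Bool.false_eq_true, if_false]
        simp
    · rw [if_neg h1, ih]
      have hb : (PySem.Str.startswith l "~" && (p == lstripT (splitHead l))) = false := by
        simp only [Bool.and_eq_false_iff]; left; simpa using h1
      rw [hb]
      simp

theorem bbuild_pos_get? (c2 : List String) (j : Int)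
    (neg pos : PySem.Dict String Int) (p : String) :
    (bbuild c2 j neg pos).2.get? p =
      if pos.contains p then pos.get? p else searchPos p c2 j := by
  induction c2 generalizing j neg pos with
  | nil =>
    rw [PySem.Dict.contains_eq_isSome_get?]
    cases hn : pos.get? p <;> simp [bbuild, searchPos, hn]
  | cons l rest ih =>
    simp only [bbuild, searchPos]
    by_cases h1 : PySem.Str.startswith l "~" = true
    · rw [if_pos h1, ih]
      have hb : (!PySem.Str.startswith l "~" && (p == splitHead l)) = false := by
        rw [h1]; simp
      rw [hb]
      simp
    · rw [if_neg h1, ih]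
      have h1' : PySem.Str.startswith l "~" = false := by
        simpa using h1
      by_cases h2 : p = splitHead l
      · rw [h2, PySem.Dict.contains_setdefault, PySem.Dict.get?_setdefault_self]
        simp only [BEq.rfl, Bool.true_or, if_true, h1', Bool.not_false, Bool.true_and]
        rw [PySem.Dict.contains_eq_isSome_get?]
        cases hn : pos.get? (splitHead l) <;> simp [hn]
      · have hb : (p == splitHead l) = false := by
          simpa using h2
        rw [PySem.Dict.contains_setdefault,
            PySem.Dict.get?_setdefault_of_ne _ _ h2, hb]
        simp only [Bool.or_false, Bool.and_false, Bool.false_eq_true, if_false]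
        simp

theorem loop1_eq (c1 c2 : List String) (i : Int) :
    aloop1 c1 c2 i = bloop1 (bbuild c2 0 PySem.Dict.empty PySem.Dict.empty).1 c1 i := by
  induction c1 generalizing i with
  | nil => rfl
  | cons l rest ih =>
    simp only [aloop1, bloop1, bbuild_neg_get?, PySem.Dict.contains_empty,
      if_false, afind1_eq, Bool.false_eq_true, ih]

theorem loop2_eq (c1 c2 : List String) (i : Int) :
    aloop2 c1 c2 i = bloop2 (bbuild c2 0 PySem.Dict.empty PySem.Dict.empty).2 c1 i := by
  induction c1 generalizing i with
  | nil => rfl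
  | cons l rest ih =>
    simp only [aloop2, bloop2, bbuild_pos_get?, PySem.Dict.contains_empty,
      if_false, afind2_eq, Bool.false_eq_true, ih]

-- ===== VERDICT (by name: the statement is the Claim_ definition above) =====
theorem indexfind_spec : Claim_equal_indexfind := by
  intro clause1 clause2 _
  unfold Spec_indexfind indexfind indexfind_alt
  rw [loop1_eq, loop2_eq]
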